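-- pv_equiv track=rewrite | github.com/Nondual-Observer/DOT | companion_code/scripts/companion_legacy/dot_boundary_engine.py | phi_coeffs
-- ===== SOURCE A (Python) =====
-- MAX_N_DEFAULT = 200
--
-- def phi_coeffs(n_max: int = MAX_N_DEFAULT) -> list[int]:
--     c = [0] * (n_max + 1)
--     c[0] = 1
--     n = 1
--     while n * n <= n_max:
--         c[n * n] += 2
--         n += 1
--     return c
-- ===== SOURCE B (Python) =====
-- MAX_N_DEFAULT = 200
--
-- def phi_coeffs(n_max: int = MAX_N_DEFAULT) -> list[int]:
--     result = []
--     k = 0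
--     for i in range(n_max + 1):
--         if i == (k + 1) * (k + 1):
--             k += 1
--         result.append(2 if i == k * k else 0)
--     result[0] = 1
--     return result
-- ===== Notes on version B (the rewrite author's own statement) =====
-- stated objective: alternative
-- what changed: A allocates a zero list and walks the square roots n=1,2,... patching index n*n; B makes one pass over every index 0..n_max carrying a running integer-sqrt counter and classifies each index as square or not as it appends it.
import Mathlib
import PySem

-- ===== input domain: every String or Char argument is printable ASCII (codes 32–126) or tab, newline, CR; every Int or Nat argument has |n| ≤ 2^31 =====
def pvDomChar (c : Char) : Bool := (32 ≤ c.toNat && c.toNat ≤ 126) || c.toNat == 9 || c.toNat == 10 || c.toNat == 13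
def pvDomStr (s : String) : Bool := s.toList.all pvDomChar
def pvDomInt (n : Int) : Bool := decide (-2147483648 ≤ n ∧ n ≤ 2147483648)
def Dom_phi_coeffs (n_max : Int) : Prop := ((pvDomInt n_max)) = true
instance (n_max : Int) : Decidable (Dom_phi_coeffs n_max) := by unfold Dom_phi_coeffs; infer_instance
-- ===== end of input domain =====

-- B replaces A's walk over the square roots n=1,2,... (patching c[n*n]) by one pass over
-- all indices 0..n_max with a running integer-sqrt counter (objective: alternative).

-- ===== PORT A =====
-- while n * n <= n_max: c[n*n] += 2; n += 1
def phiLoopA (n_max : Int) (n : Int) (cs : List Int) : List Int :=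
  if n * n ≤ n_max then
    phiLoopA n_max (n + 1) (PySem.List.pySetD cs (n * n) (PySem.List.pyGetD cs (n * n) 0 + 2))
  else cs
termination_by (n_max + 1 - n).toNat
decreasing_by
  have h1 : 4 * (n * n) ≥ 4 * n - 1 := by nlinarith [sq_nonneg (2 * n - 1)]
  omega

def phi_coeffs (n_max : Int) : List Int :=
  -- c = [0] * (n_max + 1); c[0] = 1 (in range by Pre_); then the while loop
  phiLoopA n_max 1 (PySem.List.pySetD (List.replicate (n_max + 1).toNat (0 : Int)) 0 1)

-- ===== PORT B =====
-- body of B's for-loop: bump the running sqrt counter k, append the classification of i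
def stepB (st : Int × List Int) (i : Int) : Int × List Int :=
  let k := if i = (st.1 + 1) * (st.1 + 1) then st.1 + 1 else st.1
  (k, st.2 ++ [if i = k * k then 2 else 0])

def phi_coeffs_alt (n_max : Int) : List Int :=
  -- for i in range(n_max + 1): ...; result[0] = 1 (in range by Pre_)
  PySem.List.pySetD
    ((PySem.List.pyRange 0 (n_max + 1) 1).foldl stepB ((0 : Int), ([] : List Int))).2 0 1

-- ===== PRECONDITION & SPEC =====
-- A raises IndexError (c[0] = 1 on the empty list) for n_max < 0, and so does B.
def Pre_phi_coeffs (n_max : Int) : Prop := 0 ≤ n_max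
instance (n_max : Int) : Decidable (Pre_phi_coeffs n_max) := by unfold Pre_phi_coeffs; infer_instance
def pvWitness_phi_coeffs : Int := (10)

def Spec_phi_coeffs (n_max : Int) (out : List Int) : Prop := out = phi_coeffs_alt n_max
instance (n_max : Int) (out : List Int) : Decidable (Spec_phi_coeffs n_max out) := by unfold Spec_phi_coeffs; infer_instance

-- ===== CLAIM (what is proved, stated in full; the proofs are below) =====
def Claim_equal_phi_coeffs : Prop := ∀ (n_max : Int), Dom_phi_coeffs n_max → Pre_phi_coeffs n_max → Spec_phi_coeffs n_max (phi_coeffs n_max)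

-- ===== LEMMAS AND PROOFS =====

-- entry j of either list before the final index-0 override: 2 at perfect squares, 0 elsewhere
def sqEntry (j : Nat) : Int := if Nat.sqrt j * Nat.sqrt j = j then 2 else 0

theorem sqrt_mul_self (m : Nat) : Nat.sqrt (m * m) = m := by
  simpa [pow_two] using Nat.sqrt_eq' m

theorem sqrt_step (N : Nat) :
    Nat.sqrt (N + 1) = if N + 1 = (Nat.sqrt N + 1) * (Nat.sqrt N + 1) then Nat.sqrt N + 1 else Nat.sqrt N := by
  have h1 : Nat.sqrt N ≤ Nat.sqrt (N + 1) := Nat.sqrt_le_sqrt (by omega)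
  have h2 : N < (Nat.sqrt N + 1) * (Nat.sqrt N + 1) := Nat.lt_succ_sqrt N
  have h3 : Nat.sqrt (N + 1) ≤ Nat.sqrt N + 1 := by
    have h := Nat.sqrt_le_sqrt (show N + 1 ≤ (Nat.sqrt N + 1) * (Nat.sqrt N + 1) by omega)
    rwa [sqrt_mul_self] at h
  have h4 : Nat.sqrt (N + 1) * Nat.sqrt (N + 1) ≤ N + 1 := by
    simpa [pow_two] using Nat.sqrt_le' (N + 1)
  split
  · next heq => rw [heq, sqrt_mul_self]
  · next hne =>
      by_contra hcon
      have he : Nat.sqrt (N + 1) = Nat.sqrt N + 1 := by omega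
      rw [he] at h4
      omega

theorem foldB_succ (N : Nat) :
    (PySem.List.pyRange 0 ((N : Int) + 1) 1).foldl stepB ((0 : Int), ([] : List Int))
      = (((Nat.sqrt N : Nat) : Int), (List.range (N + 1)).map sqEntry) := by
  induction N with
  | zero => decide
  | succ n ih =>
      rw [(show ((↑(n + 1) : Int) + 1) = (((n : Int) + 1) + 1) by push_cast; ring),
          PySem.List.pyRange_one_succ_right (by omega), List.foldl_append, ih]
      simp only [List.foldl, stepB]
      have hk : (if ((n : Int) + 1) = ((Nat.sqrt n : Int) + 1) * ((Nat.sqrt n : Int) + 1)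
            then (Nat.sqrt n : Int) + 1 else (Nat.sqrt n : Int)) = ((Nat.sqrt (n + 1) : Nat) : Int) := by
        rw [sqrt_step n]
        by_cases h : n + 1 = (Nat.sqrt n + 1) * (Nat.sqrt n + 1)
        · rw [if_pos (by exact_mod_cast h), if_pos h]; push_cast; ring
        · rw [if_neg (fun hc => h (by exact_mod_cast hc)), if_neg h]
      rw [hk]
      have hentry : (if ((n : Int) + 1) = ((Nat.sqrt (n + 1) : Nat) : Int) * ((Nat.sqrt (n + 1) : Nat) : Int)
            then (2 : Int) else 0) = sqEntry (n + 1) := by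
        unfold sqEntry
        by_cases h : Nat.sqrt (n + 1) * Nat.sqrt (n + 1) = n + 1
        · rw [if_pos (by exact_mod_cast h.symm), if_pos h]
        · rw [if_neg (fun hc => h (by exact_mod_cast hc.symm)), if_neg h]
      rw [hentry, List.range_succ (n := n + 1), List.map_append]
      rfl

theorem phiLoopA_length (n_max : Int) (n : Int) (cs : List Int) :
    (phiLoopA n_max n cs).length = cs.length := by
  fun_induction phiLoopA n_max n cs with
  | _ => simp_all [PySem.List.length_pySetD]

theorem pySetD_zero (xs : List Int) (v : Int) : PySem.List.pySetD xs 0 v = xs.set 0 v := by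
  simp [PySem.List.pySetD_of_nonneg]

theorem phiLoopA_get (n_max : Int) (n : Int) (cs : List Int) :
    1 ≤ n → (cs.length : Int) = n_max + 1 →
    ∀ (j : Nat) (hj : j < cs.length),
      (phiLoopA n_max n cs)[j]? =
        some (cs[j]'hj + if Nat.sqrt j * Nat.sqrt j = j ∧ n ≤ (Nat.sqrt j : Int) then 2 else 0) := by
  fun_induction phiLoopA n_max n cs with
  | case1 n cs hcond ih =>
      intro hn hlen j hj
      have hnn0 : (0 : Int) ≤ n * n := by nlinarith
      obtain ⟨k, hk⟩ : ∃ k : Nat, (k : Int) = n * n := ⟨(n * n).toNat, by omega⟩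
      rw [← hk] at ih ⊢
      have hidx : k < cs.length := by omega
      have hset : PySem.List.pySetD cs (k : Int) (PySem.List.pyGetD cs (k : Int) 0 + 2)
          = cs.set k (cs[k]'hidx + 2) := by
        simp [List.getElem?_eq_getElem hidx]
      rw [hset] at ih ⊢
      have hj' : j < (cs.set k (cs[k]'hidx + 2)).length := by simpa using hj
      rw [ih (by omega) (by simpa using hlen) j hj']
      have hgetset : (cs.set k (cs[k]'hidx + 2))[j]'hj'
          = if k = j then cs[k]'hidx + 2 else cs[j]'hj := by
        by_cases h : k = j
        · subst h; simp
        · simp [h]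
      rw [hgetset]
      have hnm : n = ((n.toNat : Nat) : Int) := by omega
      by_cases heq : k = j
      · -- j is exactly the square patched in this iteration
        subst heq
        have hjm : k = n.toNat * n.toNat := by
          have h1 : ((n.toNat * n.toNat : Nat) : Int) = n * n := by push_cast; rw [← hnm]
          exact_mod_cast hk.trans h1.symm
        have hsq : Nat.sqrt k = n.toNat := by rw [hjm, sqrt_mul_self]
        have hcondT : Nat.sqrt k * Nat.sqrt k = k ∧ n ≤ (Nat.sqrt k : Int) := by
          refine ⟨by rw [hsq]; exact hjm.symm, by rw [hsq]; omega⟩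
        have hcondF : ¬ (Nat.sqrt k * Nat.sqrt k = k ∧ n + 1 ≤ (Nat.sqrt k : Int)) := by
          rw [hsq]; rintro ⟨_, hle⟩; omega
        rw [if_pos rfl, if_neg hcondF, if_pos hcondT]
        norm_num
      · -- j untouched this iteration: the remaining-loop condition is unchanged
        have hiff : (Nat.sqrt j * Nat.sqrt j = j ∧ n + 1 ≤ (Nat.sqrt j : Int))
            ↔ (Nat.sqrt j * Nat.sqrt j = j ∧ n ≤ (Nat.sqrt j : Int)) := by
          constructor
          · exact fun ⟨h1, h2⟩ => ⟨h1, by omega⟩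
          · rintro ⟨h1, h2⟩
            refine ⟨h1, ?_⟩
            by_contra hlt
            have hs : (Nat.sqrt j : Int) = n := by omega
            have hji : (j : Int) = n * n := by
              rw [← hs]; exact_mod_cast h1.symm
            exact heq (by omega)
        rw [if_neg heq, if_congr hiff rfl rfl]
  | case2 n cs hcond =>
      intro hn hlen j hj
      have hnohit : ¬ (Nat.sqrt j * Nat.sqrt j = j ∧ n ≤ (Nat.sqrt j : Int)) := by
        rintro ⟨h1, h2⟩
        have hjj : ((Nat.sqrt j : Int)) * (Nat.sqrt j : Int) = (j : Int) := by exact_mod_cast h1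
        have hs1 : (1 : Int) ≤ (Nat.sqrt j : Int) := le_trans hn h2
        have : n * n ≤ ((Nat.sqrt j : Int)) * (Nat.sqrt j : Int) := by nlinarith
        omega
      rw [if_neg hnohit, List.getElem?_eq_getElem hj]
      norm_num

theorem phi_coeffs_spec : Claim_equal_phi_coeffs := by
  intro n_max _ hpre
  have hpre' : 0 ≤ n_max := hpre
  unfold Spec_phi_coeffs
  have hM : n_max = ((n_max.toNat : Nat) : Int) := by omega
  set M : Nat := n_max.toNat with hMdef
  have hA : phi_coeffs n_max = phiLoopA n_max 1 ((List.replicate (M + 1) (0 : Int)).set 0 1) := by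
    unfold phi_coeffs
    rw [(show (n_max + 1).toNat = M + 1 by omega), pySetD_zero]
  have hB : phi_coeffs_alt n_max = ((List.range (M + 1)).map sqEntry).set 0 1 := by
    unfold phi_coeffs_alt
    rw [(show n_max + 1 = (M : Int) + 1 by omega), foldB_succ M, pySetD_zero]
  rw [hA, hB]
  apply List.ext_getElem?
  intro j
  by_cases hj : j < M + 1
  · have hjA : j < ((List.replicate (M + 1) (0 : Int)).set 0 1).length := by simpa using hj
    rw [phiLoopA_get n_max 1 _ (by norm_num) (by simp; omega) j hjA]
    have hbase : ((List.replicate (M + 1) (0 : Int)).set 0 1)[j]'hjA = if j = 0 then 1 else 0 := by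
      by_cases h : j = 0
      · subst h; simp
      · rw [List.getElem_set, if_neg (Ne.symm h), List.getElem_replicate, if_neg h]
    have hjB : j < (((List.range (M + 1)).map sqEntry).set 0 1).length := by simpa using hj
    have hBj : ((((List.range (M + 1)).map sqEntry).set 0 1))[j]? = some (if j = 0 then 1 else sqEntry j) := by
      rw [List.getElem?_eq_getElem hjB]
      by_cases h : j = 0
      · subst h; simp
      · rw [List.getElem_set, if_neg (Ne.symm h)]
        simp [h]
    rw [hbase, hBj]
    by_cases h : j = 0
    · subst h
      norm_num [Nat.sqrt_zero]
    · have hiff : (Nat.sqrt j * Nat.sqrt j = j ∧ (1 : Int) ≤ (Nat.sqrt j : Int))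
          ↔ Nat.sqrt j * Nat.sqrt j = j := by
        constructor
        · exact fun ⟨h1, _⟩ => h1
        · intro h1
          refine ⟨h1, ?_⟩
          have hz : Nat.sqrt j ≠ 0 := by
            intro hz; rw [hz] at h1; simp at h1; omega
          omega
      rw [if_neg h, if_neg h, if_congr hiff rfl rfl]
      by_cases hsq : Nat.sqrt j * Nat.sqrt j = j <;> simp [sqEntry, hsq]
  · rw [List.getElem?_eq_none_iff.mpr (by rw [phiLoopA_length]; simp; omega),
        List.getElem?_eq_none_iff.mpr (by simp; omega)]
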